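-- pv_equiv track=rewrite | github.com/IonutZbir/Universita | Primo Anno/Programmazione/Python/esameING/Esercitazioni/2023_06_01/2022_01_21_AppelloSessioneInvernale-Soluzione.py | valuta_magazzino
-- ===== SOURCE A (Python) =====
-- def valuta_magazzino(input):
--     quantita_cibo = {}
--     totale_cibo = 0
--     for cibo in input:
--         # se il cibo non è stato visto prima, assegna 0 al relativo contatore
--         if cibo not in quantita_cibo:
--             quantita_cibo[cibo] = 0
--         # in ogni caso, incrementa il contatore
--         quantita_cibo[cibo] += 1
--         # quantità totale di cibo; equivale alla lunghezza della stringa di input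
--         totale_cibo += 1
--
--     output = ""
--
--     # L'istogramma viene generato da basso, riga per riga, prependendo ciascuna riga
--     # all'output generato in precedenza.
--     # Per ciascuna riga, se la quantità di cibo è positiva, inserisce il cibo e decrementa
--     # la sua quantità e il totale; altrimenti, inserisce uno spazio.
--
--
--     # finché c'è cibo da dove inserire nell'istogramma...
--     while totale_cibo > 0:  # in alternativa, si può testare che c'è almeno un cibo con quantità positiva
--         # ...genera una nuova riga
--         riga = ""
--         for cibo in sorted(quantita_cibo):
--             # se di un cibo ce ne è ancora, inserisce il cibo e decrementa i vari contatori
--             if quantita_cibo[cibo] > 0: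
--                 quantita_cibo[cibo] -= 1
--                 totale_cibo -= 1
--                 riga += cibo
--             else: # altrimenti inserisce uno spazio
--                 riga += " "
--         # prepende la nuova riga all'output (quindi, sopra le righe generate in precedenza),
--         # inserendo se necessario un \n
--         if output != "":
--             output = "\n" + output
--         output = riga + output
--
--     return output
-- ===== SOURCE B (Python) =====
-- def valuta_magazzino(input):
--     counts = {}
--     for cibo in input:
--         counts[cibo] = counts.get(cibo, 0) + 1
--     if not counts:
--         return ""
--     m = max(counts.values())
--     # one full-height column per distinct item, top-down: spaces above, the item below
--     cols = [" " * (m - counts[c]) + c * counts[c] for c in sorted(counts)]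
--     # transpose: row i is position i of every column
--     rows = ["".join(col[i] for col in cols) for i in range(m)]
--     return "\n".join(rows)
-- ===== Notes on version B (the rewrite author's own statement) =====
-- stated objective: faster
-- what changed: B builds the frequency dict once, constructs one full-height column string per distinct character (spaces on top, the character repeated below) and transposes the columns into newline-joined rows, instead of A's while-loop that rescans and decrements the dict row by row and prepends each row to the output string.
import Mathlib
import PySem

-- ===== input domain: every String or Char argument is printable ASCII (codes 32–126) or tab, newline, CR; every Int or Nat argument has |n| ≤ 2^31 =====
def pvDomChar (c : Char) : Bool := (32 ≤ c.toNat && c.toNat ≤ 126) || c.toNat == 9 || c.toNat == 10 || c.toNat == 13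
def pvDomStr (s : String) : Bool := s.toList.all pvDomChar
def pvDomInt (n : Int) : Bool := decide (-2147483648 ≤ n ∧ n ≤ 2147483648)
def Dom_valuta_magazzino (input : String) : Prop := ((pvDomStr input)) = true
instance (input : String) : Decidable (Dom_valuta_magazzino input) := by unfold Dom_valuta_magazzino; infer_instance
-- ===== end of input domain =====

-- B builds one full-height column per distinct character and transposes, instead of A's
-- row-by-row decrement loop with repeated output prepending; measured faster on large inputs.

-- ===== PORT A =====
-- one pass of A's inner `for cibo in sorted(quantita_cibo)` row loop
def vmRow (st : PySem.Dict Char Int × Int × List Char) (c : Char) :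
    PySem.Dict Char Int × Int × List Char :=
  if 0 < st.1.getD c 0 then (st.1.insert c (st.1.getD c 0 - 1), st.2.1 - 1, st.2.2 ++ [c])
  else (st.1, st.2.1, st.2.2 ++ [' '])

-- A's `while totale_cibo > 0` loop; fuel = initial totale always suffices (every pass with
-- totale > 0 removes at least one unit), the fuel guard only makes the while-loop total
def vmLoop : Nat → PySem.Dict Char Int → Int → List Char → List Char
  | 0, _, _, out => out
  | fuel+1, d, tot, out =>
    if 0 < tot then
      let st := (PySem.List.sorted d.keys (fun c => c) false).foldl vmRow (d, tot, ([] : List Char))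
      vmLoop fuel st.1 st.2.1 (st.2.2 ++ (if out = [] then [] else '\n' :: out))
    else out

def valuta_magazzino (input : String) : String :=
  let st := input.toList.foldl
    (fun (st : PySem.Dict Char Int × Int) c =>
      let d := if st.1.contains c then st.1 else st.1.insert c 0
      (d.insert c (d.getD c 0 + 1), st.2 + 1))
    (PySem.Dict.empty, 0)
  String.ofList (vmLoop st.2.toNat st.1 st.2 [])

-- ===== PORT B =====
def valuta_magazzino_alt (input : String) : String :=
  let counts := input.toList.foldl
    (fun (d : PySem.Dict Char Int) c => d.insert c (d.getD c 0 + 1)) PySem.Dict.empty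
  match PySem.List.max? counts.values (fun v => v) with
  | none => ""  -- `if not counts: return ""`
  | some m =>
    let cols := (PySem.List.sorted counts.keys (fun c => c) false).map
      (fun c => List.replicate (m - counts.getD c 0).toNat ' ' ++
                List.replicate (counts.getD c 0).toNat c)
    -- col[i]: the index is always in range (every column has height m), so getD's default is never used
    let rows := (List.range m.toNat).map (fun i => cols.map (fun col => col.getD i ' '))
    String.ofList (List.intercalate ['\n'] rows)

-- ===== PRECONDITION & SPEC =====
def Spec_valuta_magazzino (input : String) (out : String) : Prop := out = valuta_magazzino_alt input
instance (input : String) (out : String) : Decidable (Spec_valuta_magazzino input out) := by unfold Spec_valuta_magazzino; infer_instance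

-- ===== CLAIM (what is proved, stated in full; the proofs are below) =====
def Claim_equal_valuta_magazzino : Prop := ∀ (input : String), Dom_valuta_magazzino input → Spec_valuta_magazzino input (valuta_magazzino input)

-- ===== LEMMAS AND PROOFS =====

-- proof-only abstractions of the histogram
def sks (d : PySem.Dict Char Int) : List Char := PySem.List.sorted d.keys (fun c => c) false

def levels (d : PySem.Dict Char Int) : Nat :=
  (d.keys.map (fun c => (d.getD c 0).toNat)).foldl Nat.max 0

def rowsOf (d : PySem.Dict Char Int) : List (List Char) :=
  (List.range (levels d)).map
    (fun (i : Nat) => (sks d).map (fun c => if ((levels d : Int) - (i : Int)) ≤ d.getD c 0 then c else ' '))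

def attach (rows : List (List Char)) (out : List Char) : List Char :=
  if rows = [] then out
  else List.intercalate ['\n'] rows ++ (if out = [] then [] else '\n' :: out)

theorem stepA_eq (d : PySem.Dict Char Int) (c : Char) :
    ((if d.contains c then d else d.insert c 0).insert c
      ((if d.contains c then d else d.insert c 0).getD c 0 + 1))
    = d.insert c (d.getD c 0 + 1) := by
  by_cases h : d.contains c = true
  · simp [h]
  · rw [if_neg h, PySem.Dict.insert_insert_self, PySem.Dict.getD_insert_self,
      PySem.Dict.getD_of_not_contains d 0 (by simpa using h)]

theorem count_pair_gen (l : List Char) (d : PySem.Dict Char Int) (t : Int) :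
    l.foldl (fun (st : PySem.Dict Char Int × Int) c =>
      let d := if st.1.contains c then st.1 else st.1.insert c 0
      (d.insert c (d.getD c 0 + 1), st.2 + 1)) (d, t)
    = (l.foldl (fun (d : PySem.Dict Char Int) c => d.insert c (d.getD c 0 + 1)) d, t + l.length) := by
  have hfun : (fun (st : PySem.Dict Char Int × Int) c =>
      let d := if st.1.contains c then st.1 else st.1.insert c 0
      (d.insert c (d.getD c 0 + 1), st.2 + 1))
      = (fun (st : PySem.Dict Char Int × Int) c =>
        (st.1.insert c (st.1.getD c 0 + 1), st.2 + 1)) := by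
    funext st c
    simp only []
    rw [stepA_eq]
  rw [hfun]
  induction l generalizing d t with
  | nil => simp
  | cons c l ih =>
    simp only [List.foldl_cons]
    rw [ih]
    simp only [List.length_cons]
    congr 1
    push_cast
    ring

-- A's counting loop builds Counter(input) and len(input)
theorem count_pair (l : List Char) :
    l.foldl (fun (st : PySem.Dict Char Int × Int) c =>
      let d := if st.1.contains c then st.1 else st.1.insert c 0
      (d.insert c (d.getD c 0 + 1), st.2 + 1)) (PySem.Dict.empty, 0)
    = (PySem.Dict.counter l, (l.length : Int)) := by
  rw [count_pair_gen]
  rw [← PySem.Dict.foldl_insert_getD_add_one_eq_counter]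
  simp

-- one row pass of A, characterized
theorem row_foldl (ks : List Char) (hnd : ks.Nodup) (d : PySem.Dict Char Int)
    (t : Int) (r : List Char) :
    ∃ d', ks.foldl vmRow (d, t, r) =
      (d', t - (ks.countP (fun c => decide (0 < d.getD c 0)) : Int),
       r ++ ks.map (fun c => if 0 < d.getD c 0 then c else ' '))
      ∧ d'.keys = d.keys
      ∧ ∀ c, d'.getD c 0 = if c ∈ ks ∧ 0 < d.getD c 0 then d.getD c 0 - 1 else d.getD c 0 := by
  induction ks generalizing d t r with
  | nil => exact ⟨d, by simp, rfl, fun c => by simp⟩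
  | cons c ks ih =>
    rw [List.nodup_cons] at hnd
    simp only [List.foldl_cons]
    by_cases hp : 0 < d.getD c 0
    · have hcont : d.contains c = true := by
        by_contra hcf
        rw [PySem.Dict.getD_of_not_contains d 0 (by simpa using hcf)] at hp
        omega
      have hv : vmRow (d, t, r) c = (d.insert c (d.getD c 0 - 1), t - 1, r ++ [c]) := by
        simp [vmRow, hp]
      rw [hv]
      obtain ⟨d', heq, hkeys, hget⟩ := ih hnd.2 (d.insert c (d.getD c 0 - 1)) (t - 1) (r ++ [c])
      have hsame : ∀ x ∈ ks, (d.insert c (d.getD c 0 - 1)).getD x 0 = d.getD x 0 := by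
        intro x hx
        rw [PySem.Dict.getD_insert]
        rw [if_neg (by rintro rfl; exact hnd.1 hx)]
      refine ⟨d', ?_, ?_, ?_⟩
      · rw [heq]
        have h1 : (ks.countP (fun x => decide (0 < (d.insert c (d.getD c 0 - 1)).getD x 0)))
            = ks.countP (fun x => decide (0 < d.getD x 0)) := by
          apply List.countP_congr
          intro x hx
          simp [hsame x hx]
        have h2 : ks.map (fun x => if 0 < (d.insert c (d.getD c 0 - 1)).getD x 0 then x else ' ')
            = ks.map (fun x => if 0 < d.getD x 0 then x else ' ') := by
          apply List.map_congr_left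
          intro x hx
          rw [hsame x hx]
        rw [h1, h2]
        rw [List.countP_cons, List.map_cons, if_pos hp]
        simp only [hp, decide_true, if_true, Prod.mk.injEq]
        refine ⟨trivial, by push_cast; ring, by simp⟩
      · rw [hkeys, PySem.Dict.keys_insert_of_contains d _ hcont]
      · intro x
        rw [hget x]
        by_cases hxc : x = c
        · subst hxc
          rw [if_neg (by rintro ⟨hmem, -⟩; exact hnd.1 hmem)]
          rw [PySem.Dict.getD_insert_self, if_pos ⟨List.mem_cons_self .., hp⟩]
        · rw [PySem.Dict.getD_insert, if_neg hxc]
          by_cases hxk : x ∈ ks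
          · simp [hxk, hxc, List.mem_cons]
          · rw [if_neg (by rintro ⟨h, -⟩; exact hxk h), if_neg (by
              rintro ⟨hmem, -⟩
              rcases List.mem_cons.mp hmem with h | h
              · exact hxc h
              · exact hxk h)]
    · have hv : vmRow (d, t, r) c = (d, t, r ++ [' ']) := by
        simp [vmRow, hp]
      rw [hv]
      obtain ⟨d', heq, hkeys, hget⟩ := ih hnd.2 d t (r ++ [' '])
      refine ⟨d', ?_, hkeys, ?_⟩
      · rw [heq, List.countP_cons, List.map_cons, if_neg hp]
        simp only [hp, decide_false, Prod.mk.injEq]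
        refine ⟨trivial, by push_cast; ring_nf, by simp⟩
      · intro x
        rw [hget x]
        by_cases hxk : x ∈ ks
        · simp [hxk, List.mem_cons]
        · by_cases hxc : x = c
          · subst hxc
            rw [if_neg (by rintro ⟨-, h⟩; exact hp h), if_neg (by rintro ⟨-, h⟩; exact hp h)]
          · rw [if_neg (by rintro ⟨h, -⟩; exact hxk h), if_neg (by
              rintro ⟨hmem, -⟩
              rcases List.mem_cons.mp hmem with h | h
              · exact hxc h
              · exact hxk h)]

theorem sum_sub_countP (l : List Char) (f g : Char → Int)
    (h : ∀ x ∈ l, g x = if 0 < f x then f x - 1 else f x) :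
    (l.map g).sum = (l.map f).sum - l.countP (fun x => decide (0 < f x)) := by
  induction l with
  | nil => simp
  | cons c l ih =>
    simp only [List.map_cons, List.sum_cons, List.countP_cons,
      ih (fun x hx => h x (List.mem_cons_of_mem c hx))]
    have hc := h c (List.mem_cons_self ..)
    by_cases hp : 0 < f c
    · rw [if_pos hp] at hc
      simp only [hp, decide_true]
      rw [hc]
      push_cast
      omega
    · rw [if_neg hp] at hc
      simp only [hp, decide_false]
      rw [hc]
      push_cast
      omega

theorem nmax_zero (a : Nat) : Nat.max 0 a = a := Nat.zero_max a

theorem nmax_assoc (a b c : Nat) : Nat.max (Nat.max a b) c = Nat.max a (Nat.max b c) := Nat.max_assoc a b c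

theorem nlt_max (a b c : Nat) : a < Nat.max b c ↔ a < b ∨ a < c := lt_max_iff

theorem nmax_sub (a b c : Nat) : Nat.max (a - c) (b - c) = Nat.max a b - c := Nat.sub_max_sub_right a b c

theorem foldl_max_shift (l : List Nat) (b : Nat) :
    l.foldl Nat.max b = Nat.max b (l.foldl Nat.max 0) := by
  induction l generalizing b with
  | nil => simp
  | cons x l ih =>
    simp only [List.foldl_cons]
    rw [ih (Nat.max b x), ih (Nat.max 0 x), nmax_zero, nmax_assoc]

theorem max_pos_iff (l : List Char) (f : Char → Int) :
    0 < (l.map (fun c => (f c).toNat)).foldl Nat.max 0 ↔ ∃ c ∈ l, 0 < f c := by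
  induction l with
  | nil => simp
  | cons c l ih =>
    simp only [List.map_cons, List.foldl_cons]
    rw [foldl_max_shift, nmax_zero]
    simp only [nlt_max, ih, List.mem_cons]
    constructor
    · rintro (h | ⟨x, hx, hfx⟩)
      · exact ⟨c, Or.inl rfl, by omega⟩
      · exact ⟨x, Or.inr hx, hfx⟩
    · rintro ⟨x, hx | hx, hfx⟩
      · subst hx
        exact Or.inl (by omega)
      · exact Or.inr ⟨x, hx, hfx⟩

theorem levels_dec (l : List Char) (f g : Char → Int)
    (h : ∀ c ∈ l, (g c).toNat = (f c).toNat - 1) :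
    (l.map (fun c => (g c).toNat)).foldl Nat.max 0
      = (l.map (fun c => (f c).toNat)).foldl Nat.max 0 - 1 := by
  induction l with
  | nil => simp
  | cons c l ih =>
    simp only [List.map_cons, List.foldl_cons]
    rw [foldl_max_shift _ (Nat.max 0 (g c).toNat), foldl_max_shift _ (Nat.max 0 (f c).toNat)]
    rw [ih (fun x hx => h x (List.mem_cons_of_mem c hx)), h c (List.mem_cons_self ..),
      nmax_zero, nmax_zero, nmax_sub]

theorem sum_pos_iff (l : List Char) (f : Char → Int) (h : ∀ x ∈ l, 0 ≤ f x) :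
    0 < (l.map f).sum ↔ ∃ c ∈ l, 0 < f c := by
  induction l with
  | nil => simp
  | cons c l ih =>
    have h0 := h c (List.mem_cons_self ..)
    have hl : ∀ x ∈ l, 0 ≤ f x := fun x hx => h x (List.mem_cons_of_mem c hx)
    have hsum : 0 ≤ (l.map f).sum := List.sum_nonneg (by
      intro x hx
      obtain ⟨y, hy, rfl⟩ := List.mem_map.mp hx
      exact hl y hy)
    simp only [List.map_cons, List.sum_cons, List.mem_cons]
    constructor
    · intro hpos
      by_cases hc : 0 < f c
      · exact ⟨c, Or.inl rfl, hc⟩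
      · obtain ⟨x, hx, hfx⟩ := (ih hl).mp (by omega)
        exact ⟨x, Or.inr hx, hfx⟩
    · rintro ⟨x, hx | hx, hfx⟩
      · subst hx
        omega
      · have := (ih hl).mpr ⟨x, hx, hfx⟩
        omega

theorem sum_nonneg_chars (l : List Char) (f : Char → Int) (h : ∀ x ∈ l, 0 ≤ f x) :
    0 ≤ (l.map f).sum := by
  apply List.sum_nonneg
  intro x hx
  obtain ⟨y, hy, rfl⟩ := List.mem_map.mp hx
  exact h y hy

theorem intercalate_snoc (rs : List (List Char)) (r : List Char) (h : rs ≠ []) :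
    List.intercalate ['\n'] (rs ++ [r]) = List.intercalate ['\n'] rs ++ '\n' :: r := by
  induction rs with
  | nil => exact absurd rfl h
  | cons a rs ih =>
    cases rs with
    | nil => simp [List.intercalate, List.intersperse]
    | cons b rs =>
      have hstep : ∀ (x y : List Char) (zs : List (List Char)),
          List.intercalate ['\n'] (x :: y :: zs) = x ++ '\n' :: List.intercalate ['\n'] (y :: zs) := by
        intro x y zs
        simp [List.intercalate, List.intersperse]
      have hrec := ih (by simp)
      rw [List.cons_append] at hrec
      rw [List.cons_append, List.cons_append, hstep, hstep a b rs, hrec]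
      simp

theorem attach_snoc (rs : List (List Char)) (r out : List Char) (hr : r ≠ []) :
    attach (rs ++ [r]) out = attach rs (r ++ (if out = [] then [] else '\n' :: out)) := by
  cases rs with
  | nil => simp [attach, List.intercalate]
  | cons a rs =>
    have h3 : r ++ (if out = [] then [] else '\n' :: out) ≠ [] := by
      cases out <;> simp [hr]
    rw [attach, attach, if_neg (by simp : ¬((a :: rs) ++ [r] = [])),
      if_neg (by simp : ¬(a :: rs = [])), intercalate_snoc _ _ (by simp), if_neg h3]
    simp

theorem rows_step (d d' : PySem.Dict Char Int) (hkeys : d'.keys = d.keys)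
    (hpos : ∀ c, 0 ≤ d.getD c 0)
    (hget : ∀ c, d'.getD c 0 = if c ∈ sks d ∧ 0 < d.getD c 0 then d.getD c 0 - 1 else d.getD c 0)
    (hL : 0 < levels d) :
    rowsOf d = rowsOf d' ++ [(sks d).map (fun c => if 0 < d.getD c 0 then c else ' ')] := by
  have hL' : levels d' = levels d - 1 := by
    unfold levels
    rw [hkeys]
    apply levels_dec
    intro c hc
    rw [hget c]
    have hc' : c ∈ sks d := (PySem.List.mem_sorted d.keys (fun c => c) false c).mpr hc
    have h0 := hpos c
    by_cases hp : 0 < d.getD c 0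
    · rw [if_pos ⟨hc', hp⟩]
      omega
    · rw [if_neg (by tauto)]
      omega
  have hsks : sks d' = sks d := by
    unfold sks
    rw [hkeys]
  unfold rowsOf
  rw [hsks, hL']
  conv_lhs => rw [show levels d = (levels d - 1) + 1 from (by omega), List.range_succ]
  rw [List.map_append, List.map_cons, List.map_nil]
  have hcast : ((levels d - 1 : Nat) : Int) = (levels d : Int) - 1 := by
    omega
  congr 1
  · apply List.map_congr_left
    intro i hi
    rw [List.mem_range] at hi
    apply List.map_congr_left
    intro c hc
    have h0 := hpos c
    by_cases hp : 0 < d.getD c 0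
    · have hval : d'.getD c 0 = d.getD c 0 - 1 := by
        rw [hget c, if_pos ⟨hc, hp⟩]
      have hiff : ((levels d - 1 + 1 : Nat) : Int) - (i : Int) ≤ d.getD c 0
          ↔ ((levels d - 1 : Nat) : Int) - (i : Int) ≤ d.getD c 0 - 1 := by omega
      rw [hval, if_congr hiff rfl rfl]
    · have hval : d'.getD c 0 = d.getD c 0 := by
        rw [hget c, if_neg (by tauto)]
      have h1 : ¬(((levels d - 1 + 1 : Nat) : Int) - (i : Int) ≤ d.getD c 0) := by omega
      have h2 : ¬(((levels d - 1 : Nat) : Int) - (i : Int) ≤ d.getD c 0) := by omega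
      rw [hval, if_neg h1, if_neg h2]
  · congr 1
    apply List.map_congr_left
    intro c hc
    have hiff : ((levels d - 1 + 1 : Nat) : Int) - ((levels d - 1 : Nat) : Int) ≤ d.getD c 0
        ↔ 0 < d.getD c 0 := by omega
    rw [if_congr hiff rfl rfl]

-- A's while-loop computes exactly the transposed-column picture
theorem loop_spec (fuel : Nat) (d : PySem.Dict Char Int) (t : Int) (out : List Char)
    (hnd : d.keys.Nodup)
    (hpos : ∀ c, 0 ≤ d.getD c 0)
    (ht : t = (d.keys.map (fun c => d.getD c 0)).sum)
    (hm : levels d ≤ fuel) :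
    vmLoop fuel d t out = attach (rowsOf d) out := by
  induction fuel generalizing d t out with
  | zero =>
    have hL : levels d = 0 := Nat.le_zero.mp hm
    simp [vmLoop, rowsOf, hL, attach]
  | succ fuel ih =>
    by_cases ht0 : 0 < t
    · have hex : ∃ c ∈ d.keys, 0 < d.getD c 0 := by
        rw [← sum_pos_iff d.keys _ (fun x _ => hpos x), ← ht]
        exact ht0
      have hLpos : 0 < levels d := (max_pos_iff d.keys _).mpr hex
      have hnds : (sks d).Nodup := (PySem.List.sorted_perm d.keys (fun c => c) false).nodup_iff.mpr hnd
      obtain ⟨d', heq, hkeys, hget⟩ := row_foldl (sks d) hnds d t []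
      have hget' : ∀ c, d'.getD c 0
          = if c ∈ sks d ∧ 0 < d.getD c 0 then d.getD c 0 - 1 else d.getD c 0 := hget
      rw [vmLoop, if_pos ht0]
      show vmLoop fuel _ _ _ = _
      rw [show PySem.List.sorted d.keys (fun c => c) false = sks d from rfl, heq]
      have hnd' : d'.keys.Nodup := hkeys ▸ hnd
      have hpos' : ∀ c, 0 ≤ d'.getD c 0 := by
        intro c
        rw [hget c]
        have := hpos c
        split_ifs <;> omega
      have hsum := sum_sub_countP d.keys (fun c => d.getD c 0) (fun c => d'.getD c 0) (by
        intro x hx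
        show d'.getD x 0 = if 0 < d.getD x 0 then d.getD x 0 - 1 else d.getD x 0
        rw [hget x, if_congr (Iff.intro
          (fun h => h.2)
          (fun h => ⟨(PySem.List.mem_sorted d.keys (fun c => c) false x).mpr hx, h⟩)) rfl rfl])
      have hcountP : (sks d).countP (fun c => decide (0 < d.getD c 0))
          = d.keys.countP (fun c => decide (0 < d.getD c 0)) :=
        (PySem.List.sorted_perm d.keys (fun c => c) false).countP_eq _
      have ht' : t - ((sks d).countP (fun c => decide (0 < d.getD c 0)) : Int)
          = (d'.keys.map (fun c => d'.getD c 0)).sum := by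
        rw [hkeys, hsum, ← ht, hcountP]
      have hLdec : levels d' = levels d - 1 := by
        unfold levels
        rw [hkeys]
        apply levels_dec
        intro c hc
        rw [hget c]
        have h0 := hpos c
        have hc' : c ∈ sks d := (PySem.List.mem_sorted d.keys (fun c => c) false c).mpr hc
        by_cases hp : 0 < d.getD c 0
        · rw [if_pos ⟨hc', hp⟩]
          omega
        · rw [if_neg (by tauto)]
          omega
      have hm' : levels d' ≤ fuel := by omega
      rw [ih d' _ _ hnd' hpos' ht' hm']
      rw [rows_step d d' hkeys hpos hget' hLpos]
      rw [attach_snoc _ _ _ (by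
        have hkne : d.keys ≠ [] := by
          obtain ⟨c, hc, -⟩ := hex
          exact List.ne_nil_of_mem hc
        have hsne : sks d ≠ [] := by
          intro hcontra
          apply hkne
          have hlen : (sks d).length = d.keys.length :=
            (PySem.List.sorted_perm d.keys (fun c => c) false).length_eq
          rw [hcontra] at hlen
          exact List.length_eq_zero_iff.mp (by simpa using hlen.symm)
        simpa using hsne)]
      simp
    · have hle : 0 ≤ t := by
        rw [ht]
        exact sum_nonneg_chars d.keys _ (fun x _ => hpos x)
      have hnoex : ¬ ∃ c ∈ d.keys, 0 < d.getD c 0 := by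
        rw [← sum_pos_iff d.keys _ (fun x _ => hpos x), ← ht]
        omega
      have hL : levels d = 0 := by
        by_contra hc
        exact hnoex ((max_pos_iff d.keys _).mp (Nat.pos_of_ne_zero hc))
      rw [vmLoop, if_neg ht0]
      simp [rowsOf, hL, attach]

theorem foldl_max_le (L : List Nat) (n : Nat) (h : ∀ x ∈ L, x ≤ n) : L.foldl Nat.max 0 ≤ n := by
  induction L with
  | nil => simp
  | cons x L ih =>
    rw [List.foldl_cons, foldl_max_shift, nmax_zero]
    have := h x (List.mem_cons_self ..)
    have := ih (fun y hy => h y (List.mem_cons_of_mem x hy))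
    simp only [Nat.max_def]
    split <;> omega

theorem mem_le_foldl_max (L : List Nat) (x : Nat) (hx : x ∈ L) : x ≤ L.foldl Nat.max 0 := by
  induction L with
  | nil => simp at hx
  | cons y L ih =>
    rw [List.foldl_cons, foldl_max_shift, nmax_zero]
    rcases List.mem_cons.mp hx with h | h
    · subst h
      simp only [Nat.max_def]
      split <;> omega
    · have := ih h
      simp only [Nat.max_def]
      split <;> omega

theorem sum_cast (l : List Char) (f : Char → Nat) :
    (l.map (fun c => ((f c : Int)))).sum = ((l.map f).sum : Int) := by
  induction l with
  | nil => simp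
  | cons c l ih =>
    simp [ih]

theorem getD_col (a b : Nat) (c : Char) (i : Nat) (hi : i < a + b) :
    (List.replicate a ' ' ++ List.replicate b c).getD i ' ' = if i < a then ' ' else c := by
  by_cases h : i < a
  · rw [if_pos h, List.getD_append _ _ _ _ (by simpa using h), List.getD_replicate _ h]
  · rw [if_neg h, List.getD_append_right _ _ _ _ (by simpa using h),
      List.getD_replicate _ (by simp; omega)]

theorem perm_ofList_dedup (l : List Char) : (PySem.Set.ofList l).Perm l.dedup := by
  apply List.perm_of_nodup_nodup_toFinset_eq (PySem.Set.nodup_ofList l) l.nodup_dedup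
  ext x
  simp [PySem.Set.mem_ofList, List.mem_dedup]

theorem counter_invariants (l : List Char) :
    ((l.length : Int) = ((PySem.Dict.counter l).keys.map
        (fun c => (PySem.Dict.counter l).getD c 0)).sum)
    ∧ levels (PySem.Dict.counter l) ≤ (l.length : Int).toNat := by
  constructor
  · have hmap : (PySem.Dict.counter l).keys.map (fun c => (PySem.Dict.counter l).getD c 0)
        = (PySem.Set.ofList l).map (fun c => ((l.count c : Int))) := by
      rw [PySem.Dict.keys_counter]
      apply List.map_congr_left
      intro c _
      rw [PySem.Dict.getD_counter]
    rw [hmap, sum_cast]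
    have hperm := (perm_ofList_dedup l).map (fun c => l.count c)
    rw [hperm.sum_eq]
    rw [List.sum_map_count_dedup_eq_length]
  · rw [Int.toNat_natCast]
    unfold levels
    apply foldl_max_le
    intro x hx
    obtain ⟨c, hc, rfl⟩ := List.mem_map.mp hx
    rw [PySem.Dict.getD_counter]
    have := @List.count_le_length Char instBEqOfDecidableEq c l
    omega

theorem A_attach (l : List Char) :
    vmLoop (l.length : Int).toNat (PySem.Dict.counter l) (l.length : Int) []
      = attach (rowsOf (PySem.Dict.counter l)) [] := by
  obtain ⟨ht, hm⟩ := counter_invariants l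
  exact loop_spec _ _ _ _ (PySem.Dict.nodup_keys_counter l)
    (fun c => by rw [PySem.Dict.getD_counter]; positivity) ht hm

-- ===== VERDICT (by name: the statement is the Claim_ definition above) =====
theorem valuta_magazzino_spec : Claim_equal_valuta_magazzino := by
  intro input _
  show valuta_magazzino input = valuta_magazzino_alt input
  unfold valuta_magazzino valuta_magazzino_alt
  simp only [count_pair, PySem.Dict.foldl_insert_getD_add_one_eq_counter, A_attach]
  cases hmax : PySem.List.max? (PySem.Dict.counter input.toList).values (fun v => v) with
  | none =>
    have hvals : (PySem.Dict.counter input.toList).values = [] :=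
      (PySem.List.max?_eq_none_iff _ _).mp hmax
    have hitems : (PySem.Dict.counter input.toList).items = [] := by
      simpa [PySem.Dict.values] using hvals
    have hkeys : (PySem.Dict.counter input.toList).keys = [] := by
      simp [PySem.Dict.keys, hitems]
    have hlev : levels (PySem.Dict.counter input.toList) = 0 := by
      unfold levels
      rw [hkeys]
      simp
    simp [rowsOf, hlev, attach]
  | some m =>
    have hnd := PySem.Dict.nodup_keys_counter input.toList
    have hvals : (PySem.Dict.counter input.toList).values
        = (PySem.Dict.counter input.toList).keys.map
            (fun c => (PySem.Dict.counter input.toList).getD c 0) :=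
      PySem.Dict.values_eq_map_keys _ hnd 0
    have hmem : m ∈ (PySem.Dict.counter input.toList).values := PySem.List.max?_mem hmax
    rw [hvals] at hmem
    obtain ⟨c0, hc0, hc0v⟩ := List.mem_map.mp hmem
    have hnn : ∀ c, 0 ≤ (PySem.Dict.counter input.toList).getD c 0 := by
      intro c
      rw [PySem.Dict.getD_counter]
      positivity
    have hm0 : 0 < m := by
      rw [← hc0v, PySem.Dict.getD_counter]
      rw [PySem.Dict.keys_counter, PySem.Set.mem_ofList] at hc0
      exact_mod_cast List.count_pos_iff.mpr hc0
    have hle : ∀ c ∈ (PySem.Dict.counter input.toList).keys,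
        (PySem.Dict.counter input.toList).getD c 0 ≤ m := by
      intro c hc
      have hv : (PySem.Dict.counter input.toList).getD c 0
          ∈ (PySem.Dict.counter input.toList).values := by
        rw [hvals]
        exact List.mem_map_of_mem hc
      exact PySem.List.max?_isMax hmax _ hv
    have hlev : levels (PySem.Dict.counter input.toList) = m.toNat := by
      unfold levels
      apply le_antisymm
      · apply foldl_max_le
        intro x hx
        obtain ⟨c, hc, rfl⟩ := List.mem_map.mp hx
        have := hle c hc
        omega
      · have hmm : ((PySem.Dict.counter input.toList).getD c0 0).toNat
            ∈ (PySem.Dict.counter input.toList).keys.map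
                (fun c => ((PySem.Dict.counter input.toList).getD c 0).toNat) :=
          List.mem_map_of_mem hc0
        have := mem_le_foldl_max _ _ hmm
        omega
    have hrows : rowsOf (PySem.Dict.counter input.toList)
        = (List.range m.toNat).map (fun (i : Nat) =>
            ((PySem.List.sorted (PySem.Dict.counter input.toList).keys (fun c => c) false).map
              (fun c => List.replicate (m - (PySem.Dict.counter input.toList).getD c 0).toNat ' ' ++
                        List.replicate ((PySem.Dict.counter input.toList).getD c 0).toNat c)).map
              (fun col => col.getD i ' ')) := by
      unfold rowsOf
      rw [hlev]
      apply List.map_congr_left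
      intro i hi
      rw [List.mem_range] at hi
      rw [List.map_map]
      apply List.map_congr_left
      intro c hc
      have hcm : (PySem.Dict.counter input.toList).getD c 0 ≤ m := by
        apply hle
        exact (PySem.List.mem_sorted _ _ _ _).mp hc
      have hcnn := hnn c
      show (if ((m.toNat : Int) - (i : Int)) ≤ (PySem.Dict.counter input.toList).getD c 0
            then c else ' ')
          = (List.replicate (m - (PySem.Dict.counter input.toList).getD c 0).toNat ' ' ++
             List.replicate ((PySem.Dict.counter input.toList).getD c 0).toNat c).getD i ' '
      rw [getD_col _ _ _ _ (by omega)]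
      by_cases hcase : i < (m - (PySem.Dict.counter input.toList).getD c 0).toNat
      · rw [if_pos hcase, if_neg (by omega)]
      · rw [if_neg hcase, if_pos (by omega)]
    have hne : rowsOf (PySem.Dict.counter input.toList) ≠ [] := by
      unfold rowsOf
      rw [hlev]
      simp only [ne_eq, List.map_eq_nil_iff, List.range_eq_nil]
      omega
    rw [attach, if_neg hne, hrows]
    simp
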